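-- pv_equiv track=rewrite | github.com/alaiasolkobreslin/bril | examples/l4.py | meet
-- ===== SOURCE A (Python) =====
-- def meet(val_dicts):
--     out_dict = {}
--     for val_dict in val_dicts:
--         if not val_dict:
--             continue
--         for (key, val) in val_dict.items():
--             if val == '?':
--                 out_dict[key] = val
--             elif key in out_dict:
--                 if val == out_dict[key]:
--                     continue
--                 out_dict[key] = '?'
--             else:
--                 out_dict[key] = val
--     return out_dict
-- ===== SOURCE B (Python) =====
-- def meet(val_dicts):
--     # Pass 1: group every value seen for each key, in first-encounter key order.
--     groups = {}
--     for val_dict in val_dicts: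
--         if not val_dict:
--             continue
--         for (key, val) in val_dict.items():
--             groups[key] = groups.get(key, []) + [val]
--     # Pass 2: lattice meet per key: one common value collapses, any divergence
--     # or any '?' yields '?' (a '?' is never equal to every other value unless
--     # all of them are '?', in which case '?' is the meet anyway).
--     return {key: vals[0] if all(v == vals[0] for v in vals) else '?'
--             for (key, vals) in groups.items()}
-- ===== Notes on version B (the rewrite author's own statement) =====
-- stated objective: alternative
-- what changed: Replaces A's single-pass in-place lattice update (insert/compare/overwrite with '?') by a two-pass scheme: first group all values per key into lists, then compute each key's meet as vals[0] if all values agree and '?' otherwise.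
import Mathlib
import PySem

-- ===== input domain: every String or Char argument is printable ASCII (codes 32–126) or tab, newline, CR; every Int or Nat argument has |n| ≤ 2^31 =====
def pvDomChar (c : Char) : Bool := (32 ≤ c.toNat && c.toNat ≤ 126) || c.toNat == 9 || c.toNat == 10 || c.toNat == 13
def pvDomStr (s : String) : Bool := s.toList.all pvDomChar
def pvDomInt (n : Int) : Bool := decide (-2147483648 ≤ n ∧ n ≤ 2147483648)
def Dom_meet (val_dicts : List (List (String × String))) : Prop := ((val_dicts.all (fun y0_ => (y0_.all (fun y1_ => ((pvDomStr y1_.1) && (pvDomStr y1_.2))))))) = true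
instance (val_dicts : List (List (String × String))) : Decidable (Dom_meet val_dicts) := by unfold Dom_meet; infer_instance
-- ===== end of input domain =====

-- B replaces A's single-pass in-place lattice update by a two-pass scheme (group values per key,
-- then meet each group); alternative decomposition, similar cost.


-- ===== PORT A =====
-- each inner assoc list stands for a Python dict: PySem.Dict.ofList normalises it
-- (insertion order, last value wins) exactly as dict(pairs) would.
def meetStep (out : PySem.Dict String String) (kv : String × String) : PySem.Dict String String :=
  if kv.2 = "?" then out.insert kv.1 kv.2
  else if out.contains kv.1 then
    (if kv.2 = out.getD kv.1 "" then out else out.insert kv.1 "?")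
  else out.insert kv.1 kv.2

def meet (val_dicts : List (List (String × String))) : List (String × String) :=
  (val_dicts.foldl (fun out vd =>
      if vd = [] then out
      else (PySem.Dict.ofList vd).items.foldl meetStep out)
    PySem.Dict.empty).items

-- ===== PORT B =====
-- vals[0] if all(v == vals[0] for v in vals) else '?'
def meetVal : List String → String
  | [] => "?"
  | h :: t => if (h :: t).all (fun v => v == h) then h else "?"

-- groups[key] = groups.get(key, []) + [val]
def groupStep (g : PySem.Dict String (List String)) (kv : String × String) : PySem.Dict String (List String) :=
  g.modify kv.1 [] (fun vs => vs ++ [kv.2])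

def meet_alt (val_dicts : List (List (String × String))) : List (String × String) :=
  let groups := val_dicts.foldl (fun g vd =>
      if vd = [] then g
      else (PySem.Dict.ofList vd).items.foldl groupStep g)
    PySem.Dict.empty
  groups.items.map (fun kv => (kv.1, meetVal kv.2))

-- ===== PRECONDITION & SPEC =====
def Spec_meet (val_dicts : List (List (String × String))) (out : List (String × String)) : Prop := out = meet_alt val_dicts
instance (val_dicts : List (List (String × String))) (out : List (String × String)) : Decidable (Spec_meet val_dicts out) := by unfold Spec_meet; infer_instance

-- ===== CLAIM (what is proved, stated in full; the proofs are below) =====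
def Claim_equal_meet : Prop := ∀ (val_dicts : List (List (String × String))), Dom_meet val_dicts → Spec_meet val_dicts (meet val_dicts)

-- ===== LEMMAS AND PROOFS =====

-- loop invariant tying A's running meet dict to B's grouping dict
def MeetInv (out : PySem.Dict String String) (g : PySem.Dict String (List String)) : Prop :=
  out.keys = g.keys ∧ g.keys.Nodup ∧
  ∀ k ∈ g.keys, g.getD k [] ≠ [] ∧ out.getD k "" = meetVal (g.getD k [])

lemma meetVal_append (h : String) (t : List String) (v : String) :
    meetVal ((h :: t) ++ [v]) =
      if v = "?" then "?" else if v = meetVal (h :: t) then meetVal (h :: t) else "?" := by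
  by_cases ht : (t.all fun x => x == h) = true <;>
  by_cases hq : v = "?" <;>
  by_cases hv : v = h <;>
  simp_all [meetVal, List.all_append]
  intro h1 h2
  rw [if_pos ht] at h1
  exact absurd h1 hv

lemma meetInv_step (out : PySem.Dict String String) (g : PySem.Dict String (List String))
    (kv : String × String) (hinv : MeetInv out g) : MeetInv (meetStep out kv) (groupStep g kv) := by
  obtain ⟨hkeys, hnd, hval⟩ := hinv
  have hcon : out.contains kv.1 = g.contains kv.1 := by
    rw [PySem.Dict.contains_eq_decide_mem_keys, PySem.Dict.contains_eq_decide_mem_keys, hkeys]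
  have hgkeys : (groupStep g kv).keys =
      if g.contains kv.1 then g.keys else g.keys ++ [kv.1] := by
    unfold groupStep
    rw [PySem.Dict.keys_modify]
    by_cases hc : g.contains kv.1
    · rw [PySem.Dict.keys_insert_of_contains _ _ hc, if_pos hc]
    · rw [PySem.Dict.keys_insert_of_not_contains _ _ (by simpa using hc), if_neg hc]
  have houtkeys : ∀ v : String, (out.insert kv.1 v).keys =
      if g.contains kv.1 then g.keys else g.keys ++ [kv.1] := by
    intro v
    by_cases hc : g.contains kv.1
    · rw [PySem.Dict.keys_insert_of_contains _ _ (hcon.trans (by simp [hc])), if_pos hc, hkeys]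
    · rw [PySem.Dict.keys_insert_of_not_contains _ _ (by rw [hcon]; simpa using hc), if_neg hc, hkeys]
  have hndkeys : (groupStep g kv).keys.Nodup := by
    rw [hgkeys]
    by_cases hc : g.contains kv.1
    · simpa [hc]
    · have hk : kv.1 ∉ g.keys := by
        rw [PySem.Dict.contains_eq_decide_mem_keys] at hc; simpa using hc
      rw [if_neg hc]
      exact hnd.append (List.nodup_singleton _) (List.disjoint_singleton.2 hk)
  have hgetD : ∀ j, (groupStep g kv).getD j [] =
      if j = kv.1 then g.getD kv.1 [] ++ [kv.2] else g.getD j [] := by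
    intro j; unfold groupStep; rw [PySem.Dict.getD_modify]
  -- values at keys other than kv.1 are untouched on both sides
  have hother : ∀ v : String, ∀ j ∈ (groupStep g kv).keys, j ≠ kv.1 →
      (out.insert kv.1 v).getD j "" = out.getD j "" := by
    intro v j _ hj; rw [PySem.Dict.getD_insert, if_neg hj]
  have hmemold : ∀ j ∈ (groupStep g kv).keys, j ≠ kv.1 → j ∈ g.keys := by
    intro j hjmem hj
    rw [hgkeys] at hjmem
    by_cases hc : g.contains kv.1
    · simpa [hc] using hjmem
    · rcases (by simpa [hc] using hjmem : j ∈ g.keys ∨ j = kv.1) with h | h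
      · exact h
      · exact absurd h hj
  -- the new value list at kv.1 is nonempty, and its meet is what A stores
  have hnew : (groupStep g kv).getD kv.1 [] ≠ [] ∧
      (meetStep out kv).getD kv.1 "" = meetVal ((groupStep g kv).getD kv.1 []) := by
    rw [hgetD kv.1, if_pos rfl]
    by_cases hc : g.contains kv.1
    · have hk : kv.1 ∈ g.keys := by
        rw [PySem.Dict.contains_eq_decide_mem_keys] at hc; simpa using hc
      obtain ⟨hne, hv⟩ := hval kv.1 hk
      obtain ⟨h0, t0, ht⟩ := List.exists_cons_of_ne_nil hne
      rw [ht, meetVal_append]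
      refine ⟨by simp, ?_⟩
      have hv' : out.getD kv.1 "" = meetVal (h0 :: t0) := by rw [hv, ht]
      unfold meetStep
      by_cases hq : kv.2 = "?"
      · simp [hq, PySem.Dict.getD_insert_self]
      · rw [if_neg hq, if_pos (hcon.trans (by simp [hc])), if_neg hq]
        by_cases heq : kv.2 = out.getD kv.1 ""
        · rw [if_pos heq, if_pos (heq.trans hv'), hv']
        · rw [if_neg heq, if_neg (fun hx => heq (hx.trans hv'.symm)),
            PySem.Dict.getD_insert_self]
    · have hnotc : g.getD kv.1 [] = [] := PySem.Dict.getD_of_not_contains _ _ (by simpa using hc)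
      have houtc : out.contains kv.1 = false := by rw [hcon]; simpa using hc
      rw [hnotc]
      refine ⟨by simp, ?_⟩
      unfold meetStep
      by_cases hq : kv.2 = "?"
      · rw [if_pos hq, PySem.Dict.getD_insert_self]
        simp [meetVal, hq]
      · rw [if_neg hq, if_neg (by simp [houtc] : ¬ out.contains kv.1 = true),
          PySem.Dict.getD_insert_self]
        simp [meetVal]
  refine ⟨?_, hndkeys, ?_⟩
  · -- keys of both sides agree after the step
    unfold meetStep
    by_cases hq : kv.2 = "?"
    · rw [if_pos hq, houtkeys, hgkeys]
    · rw [if_neg hq]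
      by_cases hc : g.contains kv.1
      · rw [if_pos (hcon.trans (by simp [hc]))]
        by_cases heq : kv.2 = out.getD kv.1 ""
        · rw [if_pos heq, hkeys, hgkeys, if_pos hc]
        · rw [if_neg heq, houtkeys, hgkeys]
      · rw [hcon, if_neg (by simpa using hc), houtkeys, hgkeys]
  · intro j hjmem
    by_cases hj : j = kv.1
    · subst hj; exact hnew
    · have hjold : j ∈ g.keys := hmemold j hjmem hj
      obtain ⟨hne, hv⟩ := hval j hjold
      have hg' : (groupStep g kv).getD j [] = g.getD j [] := by rw [hgetD j, if_neg hj]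
      refine ⟨by rw [hg']; exact hne, ?_⟩
      rw [hg', ← hv]
      unfold meetStep
      by_cases hq : kv.2 = "?"
      · rw [if_pos hq]; exact hother _ j hjmem hj
      · rw [if_neg hq]
        by_cases hc2 : out.contains kv.1 = true
        · rw [if_pos hc2]
          by_cases heq : kv.2 = out.getD kv.1 ""
          · rw [if_pos heq]
          · rw [if_neg heq]; exact hother _ j hjmem hj
        · rw [if_neg hc2]; exact hother _ j hjmem hj

lemma meetInv_foldl (ps : List (String × String)) (out : PySem.Dict String String)
    (g : PySem.Dict String (List String)) (hinv : MeetInv out g) :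
    MeetInv (ps.foldl meetStep out) (ps.foldl groupStep g) := by
  induction ps generalizing out g with
  | nil => exact hinv
  | cons p ps ih => exact ih _ _ (meetInv_step out g p hinv)

lemma meetInv_outer (vds : List (List (String × String))) (out : PySem.Dict String String)
    (g : PySem.Dict String (List String)) (hinv : MeetInv out g) :
    MeetInv
      (vds.foldl (fun out vd => if vd = [] then out
        else (PySem.Dict.ofList vd).items.foldl meetStep out) out)
      (vds.foldl (fun g vd => if vd = [] then g
        else (PySem.Dict.ofList vd).items.foldl groupStep g) g) := by
  induction vds generalizing out g with
  | nil => exact hinv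
  | cons vd vds ih =>
    simp only [List.foldl_cons]
    by_cases hvd : vd = []
    · rw [if_pos hvd, if_pos hvd]; exact ih _ _ hinv
    · rw [if_neg hvd, if_neg hvd]; exact ih _ _ (meetInv_foldl _ _ _ hinv)

lemma items_of_meetInv (out : PySem.Dict String String) (g : PySem.Dict String (List String))
    (hinv : MeetInv out g) : out.items = g.items.map (fun kv => (kv.1, meetVal kv.2)) := by
  obtain ⟨hkeys, hnd, hval⟩ := hinv
  rw [PySem.Dict.items_eq_map_keys out (hkeys ▸ hnd) "", hkeys,
    PySem.Dict.items_eq_map_keys g hnd [], List.map_map]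
  exact List.map_congr_left (fun k hk => by simp [(hval k hk).2])

-- ===== VERDICT (by name: the statement is the Claim_ definition above) =====
theorem meet_spec : Claim_equal_meet := by
  intro val_dicts _
  unfold Spec_meet meet meet_alt
  exact items_of_meetInv _ _
    (meetInv_outer val_dicts PySem.Dict.empty PySem.Dict.empty
      ⟨rfl, by simp [PySem.Dict.keys_empty], fun k hk => by simp [PySem.Dict.keys_empty] at hk⟩)
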